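-- pv_equiv track=rewrite | github.com/zacharyacutey/Mathematical-Programming | Lib/ScannerLexer.py | replace_unary
-- ===== SOURCE A (Python) =====
-- atd={
--   '$uni': u'\u222a',
--   '$img': u'\u2111',
--   '$pos': u'\u2214',
--   '$neg': u'\u2238',
--   '$equ': u'\u225f',
--   '$els': u'\u219b',
--   '$ior': u'\u2228',
--   '$rea': u'\u211c',
--   '$pro': u'\u03a0',
--   '$leq': u'\u2264',
--   '$unp': u'\u220b',
--   '$neq': u'\u2260',
--   '$seq': u'\u2261',
--   '$len': u'\u03c9',
--   '$mem': u'\u2208',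
--   '$flb': u'\u230a',
--   '$fle': u'\u230b',
--   '$and': u'\u2227',
--   '$ift': u'\u2192',
--   '$sup': u'\u2283',
--   '$sum': u'\u03a3',
--   '$int': u'\u2229',
--   '$cee': u'\u2309',
--   '$sbe': u'\u2286',
--   '$sub': u'\u2282',
--   '$spe': u'\u2287',
--   '$fun': u'\u21a6',
--   '$com': u'\u2201',
--   '$sne': u'\u2262',
--   '$geq': u'\u2265',
--   '$ceb': u'\u2308',
--   '$def': u'\u225d'
-- }
--
-- def ascii_to_unicode(s):
--   i=0
--   r=""
--   while i<len(s):
--     if s[i]==u"\xd7":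
--       r+="*"
--       i+=1
--     elif s[i]==u"\xf7":
--       r+="/"
--       i+=1
--     elif s[i:i+4] in atd.keys():
--       r+=atd[s[i:i+4]]
--       i+=4
--     else:
--       r+=s[i]
--       i+=1
--   else:
--     return s
--   return r
--
-- def alphabetic(c):
--   return c in "abcdefghijklmnopqrstuvwxyzABCDEFGHIJKLMNOPQRSTUVWXYZ"
--
-- def numeric(c):
--   return c in "0123456789"
--
-- def alphanumeric(c):
--   return alphabetic(c) or numeric(c)
--
-- def is_unary(s,p):
--   if p==0:
--     return True
--   return not alphanumeric(s[p-1])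
--
-- def unary_char(c):
--   if c=="+":
--     return ascii_to_unicode("$pos")
--   if c=="-":
--     return ascii_to_unicode("$neg")
--   return c
--
-- def replace_unary(s):
--   r=[]
--   for i in range(len(s)):
--     if is_unary(s,i):
--       r.append(unary_char(s[i]))
--     else:
--       r.append(s[i])
--   return ''.join(r)
-- ===== SOURCE B (Python) =====
-- # One re.sub with a negative lookbehind instead of A's index loop + helper chain;
-- # the callback emits the literal '$pos'/'$neg' (A's ascii_to_unicode returns its
-- # argument unchanged). Objective: idiomatic.
-- import re
--
-- _UNARY = re.compile(r'(?<![0-9A-Za-z])[+-]')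
--
-- def replace_unary(s):
--     return _UNARY.sub(lambda m: '$pos' if m.group() == '+' else '$neg', s)
-- ===== Notes on version B (the rewrite author's own statement) =====
-- stated objective: idiomatic
-- what changed: Replaces A's index loop with its is_unary/unary_char/ascii_to_unicode helper chain (whose while/else quirk makes the conversion a no-op) by a single precompiled re.sub whose negative lookbehind expresses the unary condition and whose callback emits the literal marker strings directly.
import Mathlib
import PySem

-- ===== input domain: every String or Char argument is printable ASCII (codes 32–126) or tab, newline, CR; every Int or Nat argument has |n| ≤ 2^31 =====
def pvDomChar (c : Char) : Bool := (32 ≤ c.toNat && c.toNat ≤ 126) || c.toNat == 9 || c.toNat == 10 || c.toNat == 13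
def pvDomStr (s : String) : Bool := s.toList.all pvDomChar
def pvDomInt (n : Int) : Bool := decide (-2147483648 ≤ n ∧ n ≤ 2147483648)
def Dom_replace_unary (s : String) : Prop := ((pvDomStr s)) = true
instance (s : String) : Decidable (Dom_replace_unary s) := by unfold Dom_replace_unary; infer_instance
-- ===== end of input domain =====

-- B replaces A's index loop + helper chain (is_unary / unary_char / ascii_to_unicode,
-- whose while/else makes it return its argument) by one re.sub with a negative
-- lookbehind; objective: idiomatic.


-- ===== PORT A =====
-- the module-level dict atd
def pvAtd : PySem.Dict String String := PySem.Dict.ofList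
  [("$uni", "\u222a"), ("$img", "\u2111"), ("$pos", "\u2214"), ("$neg", "\u2238"),
   ("$equ", "\u225f"), ("$els", "\u219b"), ("$ior", "\u2228"), ("$rea", "\u211c"),
   ("$pro", "\u03a0"), ("$leq", "\u2264"), ("$unp", "\u220b"), ("$neq", "\u2260"),
   ("$seq", "\u2261"), ("$len", "\u03c9"), ("$mem", "\u2208"), ("$flb", "\u230a"),
   ("$fle", "\u230b"), ("$and", "\u2227"), ("$ift", "\u2192"), ("$sup", "\u2283"),
   ("$sum", "\u03a3"), ("$int", "\u2229"), ("$cee", "\u2309"), ("$sbe", "\u2286"),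
   ("$sub", "\u2282"), ("$spe", "\u2287"), ("$fun", "\u21a6"), ("$com", "\u2201"),
   ("$sne", "\u2262"), ("$geq", "\u2265"), ("$ceb", "\u2308"), ("$def", "\u225d")]

-- the while-loop body of ascii_to_unicode (i advances by 1 or 4, both positive)
def pvAtuLoop (cs : List Char) (i : Nat) (r : List Char) : List Char :=
  if h : i < cs.length then
    if cs[i] = Char.ofNat 0xd7 then pvAtuLoop cs (i+1) (r ++ ['*'])
    else if cs[i] = Char.ofNat 0xf7 then pvAtuLoop cs (i+1) (r ++ ['/'])
    else match pvAtd.get? (String.ofList (PySem.List.slice cs (some (i:Int)) (some ((i:Int)+4)))) with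
      | some v => pvAtuLoop cs (i+4) (r ++ v.toList)
      | none => pvAtuLoop cs (i+1) (r ++ [cs[i]])
  else r
termination_by cs.length - i

def ascii_to_unicode (s : String) : String :=
  let _r := pvAtuLoop s.toList 0 []  -- the loop runs; Python's 'while … else: return s' then returns s itself
  s

def pvAlphabetic (c : Char) : Bool :=
  "abcdefghijklmnopqrstuvwxyzABCDEFGHIJKLMNOPQRSTUVWXYZ".toList.contains c

def pvNumeric (c : Char) : Bool := "0123456789".toList.contains c

def pvAlphanumeric (c : Char) : Bool := pvAlphabetic c || pvNumeric c

-- is_unary(s,p); p-1 is in range at every call site, so pyGetD is exact here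
def pvIsUnary (cs : List Char) (p : Int) : Bool :=
  if p = 0 then true else !pvAlphanumeric (PySem.List.pyGetD cs (p - 1) ' ')

def pvUnaryChar (c : Char) : String :=
  if c = '+' then ascii_to_unicode "$pos"
  else if c = '-' then ascii_to_unicode "$neg"
  else String.ofList [c]

def replace_unary (s : String) : String :=
  let cs := s.toList
  let r := (PySem.List.pyRange 0 (cs.length : Int) 1).foldl
    (fun (r : List String) i =>
      if pvIsUnary cs i then r ++ [pvUnaryChar (PySem.List.pyGetD cs i ' ')]
      else r ++ [String.ofList [PySem.List.pyGetD cs i ' ']])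
    []
  PySem.Str.join "" r

-- ===== PORT B =====
-- hand port of re.sub with pattern (?<![0-9A-Za-z])[+-]: the engine scans left to
-- right; at each position the char class [+-] must match and the negative
-- lookbehind inspects the character just before the match (absent at the start).
def pvReClass (p : Char) : Bool :=              -- the regex class [0-9A-Za-z]
  ('0' ≤ p && p ≤ '9') || ('A' ≤ p && p ≤ 'Z') || ('a' ≤ p && p ≤ 'z')

def pvReSub (prev : Option Char) : List Char → List Char
  | [] => []
  | c :: rest =>
    if (c = '+' || c = '-') && !(match prev with | some p => pvReClass p | none => false) then
      (if c = '+' then "$pos".toList else "$neg".toList) ++ pvReSub (some c) rest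
    else c :: pvReSub (some c) rest

def replace_unary_alt (s : String) : String := String.ofList (pvReSub none s.toList)

-- ===== PRECONDITION & SPEC =====
def Spec_replace_unary (s : String) (out : String) : Prop := out = replace_unary_alt s
instance (s : String) (out : String) : Decidable (Spec_replace_unary s out) := by unfold Spec_replace_unary; infer_instance

-- ===== CLAIM (what is proved, stated in full; the proofs are below) =====
def Claim_equal_replace_unary : Prop := ∀ (s : String), Dom_replace_unary s → Spec_replace_unary s (replace_unary s)

-- ===== LEMMAS AND PROOFS =====

theorem ascii_to_unicode_id (s : String) : ascii_to_unicode s = s := rfl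

-- A's table-based alphanumeric test agrees with the regex class on every character
theorem alnum_agree (c : Char) : pvAlphanumeric c = pvReClass c := by
  rw [Bool.eq_iff_iff]
  simp only [pvAlphanumeric, pvAlphabetic, pvNumeric, pvReClass, Bool.or_eq_true,
    Bool.and_eq_true, String.reduceToList, List.contains_eq_mem, decide_eq_true_eq,
    List.mem_cons, List.not_mem_nil, or_false, Char.ext_iff, UInt32.ext_iff,
    Char.le_def, UInt32.le_iff_toNat_le, Char.reduceVal, UInt32.reduceToNat]
  omega

theorem join_nil_flatten (xss : List (List Char)) : PySem.Chars.join [] xss = xss.flatten := by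
  show List.intercalate [] xss = xss.flatten
  induction xss with
  | nil => simp [List.intercalate, List.intersperse]
  | cons x rest ih => cases rest <;> simp_all [List.intercalate, List.intersperse]

-- A's append-accumulator loop is a map over the index range
theorem foldl_strings (cs : List Char) (l : List Int) (init : List String) :
    l.foldl (fun (r : List String) i =>
      if pvIsUnary cs i then r ++ [pvUnaryChar (PySem.List.pyGetD cs i ' ')]
      else r ++ [String.ofList [PySem.List.pyGetD cs i ' ']]) init
    = init ++ l.map (fun i =>
        if pvIsUnary cs i then pvUnaryChar (PySem.List.pyGetD cs i ' ')
        else String.ofList [PySem.List.pyGetD cs i ' ']) := by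
  induction l generalizing init with
  | nil => simp
  | cons x xs ih => simp only [List.foldl_cons, List.map_cons, ih]; split <;> simp

-- the heart: A's per-index pieces over the suffix equal B's regex scan, whose
-- lookbehind sees the last character of the prefix already consumed
theorem main_scan (suf : List Char) : ∀ (pre : List Char),
    ((PySem.List.pyRange (pre.length : Int) (((pre ++ suf).length : Nat) : Int) 1).map
      (fun i => if pvIsUnary (pre ++ suf) i
        then (pvUnaryChar (PySem.List.pyGetD (pre ++ suf) i ' ')).toList
        else (String.ofList [PySem.List.pyGetD (pre ++ suf) i ' ']).toList)).flatten
    = pvReSub pre.getLast? suf := by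
  induction suf with
  | nil =>
    intro pre
    rw [PySem.List.pyRange_one_eq_nil (by simp)]
    simp [pvReSub]
  | cons c rest ih =>
    intro pre
    have hlt : (pre.length : Int) < (((pre ++ c :: rest).length : Nat) : Int) := by
      simp only [List.length_append, List.length_cons]; push_cast; omega
    rw [PySem.List.pyRange_one_cons hlt, List.map_cons, List.flatten_cons]
    have hgetc : PySem.List.pyGetD (pre ++ c :: rest) ((pre.length : Nat) : Int) ' ' = c := by
      simp [PySem.List.pyGetD_natCast, List.getD]
    have htail0 := ih (pre ++ [c])
    have hlen1 : (((pre ++ [c]).length : Nat) : Int) = (pre.length : Int) + 1 := by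
      simp
    rw [List.append_assoc, List.singleton_append, hlen1, List.getLast?_concat] at htail0
    have hprev : pvIsUnary (pre ++ c :: rest) ((pre.length : Nat) : Int)
        = !(match pre.getLast? with | some p => pvReClass p | none => false) := by
      rcases List.eq_nil_or_concat pre with rfl | ⟨pre', p, rfl⟩
      · simp [pvIsUnary]
      · simp [pvIsUnary, alnum_agree p]
        intro h
        exact absurd h (by omega)
    rw [hgetc, hprev, htail0]
    cases hpb : (match pre.getLast? with | some p => pvReClass p | none => false) with
    | true =>
      by_cases hc : c = '+'
      · subst hc; simp [pvReSub, hpb]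
      · by_cases hc2 : c = '-'
        · subst hc2; simp [pvReSub, hpb]
        · simp [pvReSub, hpb, hc, hc2]
    | false =>
      by_cases hc : c = '+'
      · subst hc; simp [pvReSub, hpb, pvUnaryChar, ascii_to_unicode_id]
      · by_cases hc2 : c = '-'
        · subst hc2; simp [pvReSub, hpb, pvUnaryChar, hc, ascii_to_unicode_id]
        · simp [pvReSub, hpb, hc, hc2, pvUnaryChar]

-- ===== VERDICT (by name: the statement is the Claim_ definition above) =====
theorem replace_unary_spec : Claim_equal_replace_unary := by
  intro s _hdom
  show replace_unary s = replace_unary_alt s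
  apply String.toList_inj.mp
  have hmain := main_scan s.toList []
  simp only [List.nil_append, List.length_nil, Nat.cast_zero, List.getLast?_nil] at hmain
  simp only [replace_unary, replace_unary_alt, foldl_strings, List.nil_append,
    PySem.Str.toList_join, List.map_map, String.toList_ofList, String.toList_empty]
  rw [join_nil_flatten]
  have hlen : s.toList.length = s.length := by simp
  rw [hlen] at hmain
  rw [← hmain]
  exact congrArg List.flatten (List.map_congr_left (fun i _ => by
    by_cases h : pvIsUnary s.toList i <;> simp [h, Function.comp]))
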